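-- pv_equiv track=rewrite | github.com/JackKrubb/automated-clean-code | src/prime_printer.py | gen_2d_array
-- ===== SOURCE A (Python) =====
-- from typing import List
--
-- def gen_2d_array(num_row: int, num_col: int, list_of_prime: List[int]) -> List[List[int]]:
--     test = [[] * num_col for _ in range(num_row)]
--     k = 0
--     for i in range(num_row):
--         for _ in range(num_col):
--             if k >= len(list_of_prime):
--                 break
--             test[i].append(list_of_prime[k])
--             k += 1
--     return test
-- ===== SOURCE B (Python) =====
-- from typing import List
--
--
-- def gen_2d_array(num_row: int, num_col: int, list_of_prime: List[int]) -> List[List[int]]: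
--     c = max(num_col, 0)
--     return [list_of_prime[i * c:(i + 1) * c] for i in range(num_row)]
-- ===== Notes on version B (the rewrite author's own statement) =====
-- stated objective: simpler
-- what changed: Replaced the stateful double loop (pre-built empty rows, running counter k, per-cell append with break) by a single comprehension that computes each row independently as the slice list_of_prime[i*c:(i+1)*c] with c = max(num_col, 0).
import Mathlib
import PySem

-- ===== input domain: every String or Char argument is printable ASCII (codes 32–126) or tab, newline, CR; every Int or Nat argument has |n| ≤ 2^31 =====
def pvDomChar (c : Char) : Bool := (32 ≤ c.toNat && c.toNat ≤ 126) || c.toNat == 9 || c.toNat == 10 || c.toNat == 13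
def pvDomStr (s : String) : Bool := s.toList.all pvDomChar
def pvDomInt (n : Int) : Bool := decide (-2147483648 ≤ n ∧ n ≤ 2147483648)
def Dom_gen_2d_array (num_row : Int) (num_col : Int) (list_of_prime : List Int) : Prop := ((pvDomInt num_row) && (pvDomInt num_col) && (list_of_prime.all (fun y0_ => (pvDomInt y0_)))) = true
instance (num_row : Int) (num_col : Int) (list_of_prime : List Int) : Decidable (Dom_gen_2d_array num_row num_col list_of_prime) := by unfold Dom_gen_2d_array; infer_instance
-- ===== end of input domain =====

-- B replaces A's stateful double loop (running counter k, per-cell append, break) by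
-- independent row slices list_of_prime[i*c:(i+1)*c] with c = max(num_col, 0): simpler, no shared state.

-- ===== PORT A =====
-- inner 'for _ in range(num_col)' loop: state = (current row, counter k); 'break' when k >= len
def gen2dInnerA (lst : List Int) : Nat → Nat → List Int → (List Int × Nat)
  | 0, k, row => (row, k)
  | n + 1, k, row =>
    if k ≥ lst.length then (row, k)
    else gen2dInnerA lst n (k + 1) (row ++ [lst.getD k 0])

-- outer 'for i in range(num_row)' loop over the pre-built empty rows, threading k
def gen2dOuterA (lst : List Int) (ncol : Nat) : Nat → Nat → List (List Int)
  | 0, _ => []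
  | n + 1, k =>
    let rk := gen2dInnerA lst ncol k []
    rk.1 :: gen2dOuterA lst ncol n rk.2

def gen_2d_array (num_row : Int) (num_col : Int) (list_of_prime : List Int) : List (List Int) :=
  gen2dOuterA list_of_prime num_col.toNat num_row.toNat 0

-- ===== PORT B =====
def gen_2d_array_alt (num_row : Int) (num_col : Int) (list_of_prime : List Int) : List (List Int) :=
  let c := max num_col 0
  (List.range num_row.toNat).map
    (fun (i : Nat) => PySem.List.slice list_of_prime (some ((i : Int) * c)) (some (((i : Int) + 1) * c)))

-- ===== PRECONDITION & SPEC =====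
def Spec_gen_2d_array (num_row : Int) (num_col : Int) (list_of_prime : List Int) (out : List (List Int)) : Prop := out = gen_2d_array_alt num_row num_col list_of_prime
instance (num_row : Int) (num_col : Int) (list_of_prime : List Int) (out : List (List Int)) : Decidable (Spec_gen_2d_array num_row num_col list_of_prime out) := by unfold Spec_gen_2d_array; infer_instance

-- ===== CLAIM (what is proved, stated in full; the proofs are below) =====
def Claim_equal_gen_2d_array : Prop := ∀ (num_row : Int) (num_col : Int) (list_of_prime : List Int), Dom_gen_2d_array num_row num_col list_of_prime → Spec_gen_2d_array num_row num_col list_of_prime (gen_2d_array num_row num_col list_of_prime)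

-- ===== LEMMAS AND PROOFS =====

theorem gen2dInnerA_eq (lst : List Int) :
    ∀ (n k : Nat) (row : List Int), k ≤ lst.length →
      gen2dInnerA lst n k row = (row ++ (lst.drop k).take n, min (k + n) lst.length) := by
  intro n
  induction n with
  | zero => intro k row hk; simp [gen2dInnerA, Nat.min_eq_left hk]
  | succ n ih =>
    intro k row hk
    by_cases h : k ≥ lst.length
    · have hkl : k = lst.length := le_antisymm hk h
      simp [gen2dInnerA, hkl, List.drop_length]
    · have h' : k < lst.length := Nat.lt_of_not_le h
      have hget : lst.getD k 0 = lst[k]'h' := by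
        simp [List.getD, List.getElem?_eq_getElem h']
      rw [gen2dInnerA, if_neg h, ih (k + 1) _ (by omega), hget]
      have hdrop : lst.drop k = lst[k]'h' :: lst.drop (k + 1) :=
        List.drop_eq_getElem_cons h'
      rw [hdrop, List.take_succ_cons]
      simp only [List.append_assoc, List.singleton_append, Prod.mk.injEq]
      exact ⟨trivial, by omega⟩

theorem drop_min_add (lst : List Int) (a m : Nat) :
    lst.drop (min a lst.length + m) = lst.drop (a + m) := by
  rcases Nat.le_total a lst.length with h | h
  · rw [Nat.min_eq_left h]
  · rw [Nat.min_eq_right h]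
    rw [List.drop_eq_nil_of_le (by omega), List.drop_eq_nil_of_le (by omega)]

theorem gen2dOuterA_eq (lst : List Int) (ncol : Nat) :
    ∀ (n k : Nat), k ≤ lst.length →
      gen2dOuterA lst ncol n k =
        (List.range n).map (fun i => ((lst.drop (k + i * ncol)).take ncol)) := by
  intro n
  induction n with
  | zero => intro k hk; simp [gen2dOuterA]
  | succ n ih =>
    intro k hk
    rw [gen2dOuterA]
    rw [gen2dInnerA_eq lst ncol k [] hk]
    simp only [List.nil_append]
    rw [ih (min (k + ncol) lst.length) (by omega)]
    rw [List.range_succ_eq_map]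
    simp only [List.map_cons, List.map_map, Nat.zero_mul, Nat.add_zero]
    congr 1
    apply List.map_congr_left
    intro i _
    simp only [Function.comp]
    rw [drop_min_add]
    congr 2
    rw [Nat.succ_mul]
    omega

theorem gen_2d_array_spec' : ∀ (num_row num_col : Int) (lst : List Int),
    gen_2d_array num_row num_col lst = gen_2d_array_alt num_row num_col lst := by
  intro num_row num_col lst
  unfold gen_2d_array gen_2d_array_alt
  rw [gen2dOuterA_eq lst num_col.toNat num_row.toNat 0 (Nat.zero_le _)]
  apply List.map_congr_left
  intro i _
  have hc : max num_col 0 = ((num_col.toNat : Nat) : Int) := by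
    rw [Int.toNat_eq_max]
  simp only [hc, Nat.zero_add]
  have h1 : (i : Int) * (num_col.toNat : Int) = ((i * num_col.toNat : Nat) : Int) := by
    push_cast; ring
  have h2 : ((i : Int) + 1) * (num_col.toNat : Int) = ((i * num_col.toNat + num_col.toNat : Nat) : Int) := by
    push_cast; ring
  rw [h1, h2, PySem.List.slice_natCast, Nat.add_sub_cancel_left]

-- ===== VERDICT (by name: the statement is the Claim_ definition above) =====
theorem gen_2d_array_spec : Claim_equal_gen_2d_array := by
  intro num_row num_col lst _
  exact gen_2d_array_spec' num_row num_col lst
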